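-- pv_equiv track=rewrite | github.com/jonghyun1215/GNN_cuda | GNN_cuda_common/gin_inference.py | _build_layer_dims
-- ===== SOURCE A (Python) =====
-- def _build_layer_dims(in_dim: int, hidden_dim: int, out_dim: int, num_layers: int) -> list[tuple[int, int]]:
--     n_layers = max(1, int(num_layers))
--     if n_layers == 1:
--         return [(in_dim, out_dim)]
--     dims = [(in_dim, hidden_dim)]
--     for _ in range(n_layers - 2):
--         dims.append((hidden_dim, hidden_dim))
--     dims.append((hidden_dim, out_dim))
--     return dims
-- ===== SOURCE B (Python) =====
-- def _build_layer_dims(in_dim: int, hidden_dim: int, out_dim: int, num_layers: int) -> list[tuple[int, int]]: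
--     n_layers = max(1, int(num_layers))
--     nodes = [in_dim] + [hidden_dim] * (n_layers - 1) + [out_dim]
--     return list(zip(nodes, nodes[1:]))
-- ===== Notes on version B (the rewrite author's own statement) =====
-- stated objective: simpler
-- what changed: B builds the per-layer node-dimension sequence [in_dim, hidden*, out_dim] once and pairs adjacent entries with zip, removing A's n_layers==1 special case and its append loop.
import Mathlib
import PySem

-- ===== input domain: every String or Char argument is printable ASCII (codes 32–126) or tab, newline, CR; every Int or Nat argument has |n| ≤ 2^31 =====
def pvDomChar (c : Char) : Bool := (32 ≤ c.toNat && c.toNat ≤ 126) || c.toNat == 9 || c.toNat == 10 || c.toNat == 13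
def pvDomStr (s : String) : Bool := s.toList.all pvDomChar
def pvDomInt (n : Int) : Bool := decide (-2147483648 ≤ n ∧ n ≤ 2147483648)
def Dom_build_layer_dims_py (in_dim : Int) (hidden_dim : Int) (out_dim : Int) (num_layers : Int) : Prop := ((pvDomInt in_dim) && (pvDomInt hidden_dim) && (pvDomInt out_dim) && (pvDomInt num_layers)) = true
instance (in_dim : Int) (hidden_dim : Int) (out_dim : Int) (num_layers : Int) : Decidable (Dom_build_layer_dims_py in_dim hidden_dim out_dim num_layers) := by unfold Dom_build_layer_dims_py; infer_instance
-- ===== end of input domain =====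

-- B builds the node-dimension sequence [in_dim, hidden…, out_dim] once and pairs adjacent
-- entries, removing A's n_layers == 1 special case and its append loop (objective: simpler).

-- ===== PORT A =====
def build_layer_dims_py (in_dim : Int) (hidden_dim : Int) (out_dim : Int) (num_layers : Int) : List (Int × Int) :=
  let n_layers := max 1 num_layers
  if n_layers = 1 then [(in_dim, out_dim)]
  else
    let dims := (PySem.List.pyRange 0 (n_layers - 2) 1).foldl
      (fun d _ => d ++ [(hidden_dim, hidden_dim)]) [(in_dim, hidden_dim)]
    dims ++ [(hidden_dim, out_dim)]

-- ===== PORT B =====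
def build_layer_dims_py_alt (in_dim : Int) (hidden_dim : Int) (out_dim : Int) (num_layers : Int) : List (Int × Int) :=
  let n_layers := max 1 num_layers
  let nodes := in_dim :: List.replicate (n_layers - 1).toNat hidden_dim ++ [out_dim]
  nodes.zip nodes.tail

-- ===== PRECONDITION & SPEC =====
def Spec_build_layer_dims_py (in_dim : Int) (hidden_dim : Int) (out_dim : Int) (num_layers : Int) (out : List (Int × Int)) : Prop := out = build_layer_dims_py_alt in_dim hidden_dim out_dim num_layers
instance (in_dim : Int) (hidden_dim : Int) (out_dim : Int) (num_layers : Int) (out : List (Int × Int)) : Decidable (Spec_build_layer_dims_py in_dim hidden_dim out_dim num_layers out) := by unfold Spec_build_layer_dims_py; infer_instance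

-- ===== CLAIM =====
def Claim_equal_build_layer_dims_py : Prop := ∀ (in_dim : Int) (hidden_dim : Int) (out_dim : Int) (num_layers : Int), Dom_build_layer_dims_py in_dim hidden_dim out_dim num_layers → Spec_build_layer_dims_py in_dim hidden_dim out_dim num_layers (build_layer_dims_py in_dim hidden_dim out_dim num_layers)

-- ===== LEMMAS AND PROOFS =====

-- A's append loop over any list yields the start plus one replicated block per element.
theorem foldl_append_replicate (x : Int × Int) (l : List Int) (s : List (Int × Int)) :
    l.foldl (fun d _ => d ++ [x]) s = s ++ List.replicate l.length x := by
  induction l generalizing s with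
  | nil => simp
  | cons a t ih => simp [List.foldl, ih, List.replicate_succ]

-- B's zip of the hidden chain against its shift, in closed form.
theorem zip_chain (h o : Int) (k : Nat) :
    (h :: (List.replicate k h ++ [o])).zip (List.replicate k h ++ [o]) =
      List.replicate k (h, h) ++ [(h, o)] := by
  induction k with
  | zero => simp
  | succ k ih => simpa [List.replicate_succ] using congrArg (List.cons (h, h)) ih

-- ===== VERDICT =====
theorem build_layer_dims_py_spec : Claim_equal_build_layer_dims_py := by
  intro i h o m _
  unfold Spec_build_layer_dims_py build_layer_dims_py build_layer_dims_py_alt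
  by_cases h1 : max 1 m = 1
  · simp [h1]
  · have h2 : (2 : Int) ≤ max 1 m := by
      have := le_max_left 1 m; omega
    have hk : (max 1 m - 1).toNat = (max 1 m - 2).toNat + 1 := by omega
    simp only [if_neg h1, hk]
    rw [foldl_append_replicate, PySem.List.length_pyRange_one]
    simp only [List.replicate_succ, List.cons_append, List.zip_cons_cons, List.tail_cons]
    rw [zip_chain]
    simp
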